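-- pv_equiv track=rewrite | github.com/paritoshtripathi935/Venom | Dsa/Arrays/gfg.py | count_ice_creams
-- ===== SOURCE A (Python) =====
-- def count_ice_creams(n, k, a):
--     if k == 0:
--         return 0
--     indices = {}
--     for i in range(n):
--         if a[i] not in indices:
--             indices[a[i]] = [i]
--         else:
--             indices[a[i]].append(i)
--     count = 0
--     for flavour, inds in indices.items():
--         for i in range(len(inds)):
--             for j in range(i+1, len(inds)):
--                 if inds[j] - inds[i] >= k:
--                     count += 1
--     if count == 0 and k == 1:
--         return 0
--     return count
-- ===== SOURCE B (Python) =====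
-- def count_ice_creams(n, k, a):
--     if k == 0:
--         return 0
--     indices = {}
--     for i in range(n):
--         indices.setdefault(a[i], []).append(i)
--     count = 0
--     for inds in indices.values():
--         lo = 0
--         for q in range(len(inds)):
--             while lo < q and inds[q] - inds[lo] >= k:
--                 lo += 1
--             count += lo
--     return count
-- ===== Notes on version B (the rewrite author's own statement) =====
-- stated objective: faster
-- what changed: The per-flavour quadratic scan over all index pairs is replaced by a single two-pointer sweep per flavour (the index lists are built in increasing order), so counting is one linear pass per group instead of a nested pair loop.
import Mathlib
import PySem

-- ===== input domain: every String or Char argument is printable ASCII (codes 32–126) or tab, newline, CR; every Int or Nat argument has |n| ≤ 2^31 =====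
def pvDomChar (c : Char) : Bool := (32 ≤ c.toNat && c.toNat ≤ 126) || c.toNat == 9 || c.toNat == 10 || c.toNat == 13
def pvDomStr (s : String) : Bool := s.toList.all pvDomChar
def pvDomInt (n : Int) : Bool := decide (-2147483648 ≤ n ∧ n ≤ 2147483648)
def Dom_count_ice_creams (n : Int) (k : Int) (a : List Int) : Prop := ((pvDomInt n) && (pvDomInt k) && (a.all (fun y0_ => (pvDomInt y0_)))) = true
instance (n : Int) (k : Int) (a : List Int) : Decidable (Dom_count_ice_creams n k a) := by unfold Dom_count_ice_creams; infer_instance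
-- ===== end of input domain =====

-- B replaces A's per-flavour nested pair scan by a single two-pointer sweep over each
-- flavour's (increasing) index list: one linear pass per group instead of a quadratic one.


-- ===== PORT A =====
def count_ice_creams (n : Int) (k : Int) (a : List Int) : Int :=
  if k = 0 then 0
  else
    let indices : PySem.Dict Int (List Int) :=
      (PySem.List.pyRange 0 n).foldl (fun d i =>
        let v := PySem.List.pyGetD a i 0
        if d.contains v = false then d.insert v [i]
        else d.modify v [] (fun t => t ++ [i])) PySem.Dict.empty
    let count : Int :=
      indices.items.foldl (fun count fi =>
        let inds := fi.2
        (PySem.List.pyRange 0 (inds.length : Int)).foldl (fun count i =>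
          (PySem.List.pyRange (i + 1) (inds.length : Int)).foldl (fun count j =>
            if PySem.List.pyGetD inds j 0 - PySem.List.pyGetD inds i 0 ≥ k then count + 1
            else count) count) count) 0
    if count = 0 ∧ k = 1 then 0 else count

-- ===== PORT B =====
-- the `while lo < q and inds[q] - inds[lo] >= k: lo += 1` loop of Source B
def pvAdvance (k iq : Int) (inds : List Int) (q : Int) (lo : Int) : Int :=
  if lo < q ∧ iq - PySem.List.pyGetD inds lo 0 ≥ k then
    pvAdvance k iq inds q (lo + 1)
  else lo
termination_by (q - lo).toNat
decreasing_by omega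

def count_ice_creams_alt (n : Int) (k : Int) (a : List Int) : Int :=
  if k = 0 then 0
  else
    let indices : PySem.Dict Int (List Int) :=
      (PySem.List.pyRange 0 n).foldl (fun d i =>
        d.modify (PySem.List.pyGetD a i 0) [] (fun t => t ++ [i])) PySem.Dict.empty
    indices.values.foldl (fun count inds =>
      ((PySem.List.pyRange 0 (inds.length : Int)).foldl (fun s q =>
        let lo := pvAdvance k (PySem.List.pyGetD inds q 0) inds q s.1
        (lo, s.2 + lo)) ((0 : Int), count)).2) 0

-- ===== PRECONDITION & SPEC =====
-- Pre_ excludes exactly the inputs where Python A raises IndexError (a[i] with n > len(a),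
-- reached only when k ≠ 0); B raises there too.
def Pre_count_ice_creams (n : Int) (k : Int) (a : List Int) : Prop :=
  k = 0 ∨ n ≤ (a.length : Int)
instance (n : Int) (k : Int) (a : List Int) : Decidable (Pre_count_ice_creams n k a) := by
  unfold Pre_count_ice_creams; infer_instance

def pvWitness_count_ice_creams : Int × Int × List Int := (4, 2, [1, 1, 1, 1])

def Spec_count_ice_creams (n : Int) (k : Int) (a : List Int) (out : Int) : Prop := out = count_ice_creams_alt n k a
instance (n : Int) (k : Int) (a : List Int) (out : Int) : Decidable (Spec_count_ice_creams n k a out) := by unfold Spec_count_ice_creams; infer_instance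

-- ===== CLAIM (what is proved, stated in full; the proofs are below) =====
def Claim_equal_count_ice_creams : Prop := ∀ (n : Int) (k : Int) (a : List Int), Dom_count_ice_creams n k a → Pre_count_ice_creams n k a → Spec_count_ice_creams n k a (count_ice_creams n k a)

-- ===== LEMMAS AND PROOFS =====

-- abbreviations used only by the proofs
def pvX (k : Int) (l : List Int) (p q : Nat) : Bool := decide (l.getD q 0 - l.getD p 0 ≥ k)

def pvN (k : Int) (l : List Int) (q : Nat) : Nat := (List.range q).countP (fun p => pvX k l p q)

def pvA (k : Int) (l : List Int) : Int :=
  ((List.range l.length).map (fun i =>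
    ((List.range (l.length - (i + 1))).countP (fun t => pvX k l i (i + 1 + t)) : Int))).sum

def pvB (k : Int) (l : List Int) : Int :=
  ((List.range l.length).map (fun q => (pvN k l q : Int))).sum

-- A's dict-building step IS B's dict-building step
lemma pv_step_eq (d : PySem.Dict Int (List Int)) (v i : Int) :
    (if d.contains v = false then d.insert v [i] else d.modify v [] (fun t => t ++ [i]))
      = d.modify v [] (fun t => t ++ [i]) := by
  by_cases h : d.contains v = false
  · simp only [h, if_true]
    have hn : d.get? v = none := by
      rw [PySem.Dict.contains_eq_isSome_get?] at h
      cases hg : d.get? v with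
      | none => rfl
      | some w => rw [hg] at h; simp at h
    simp [PySem.Dict.modify, PySem.Dict.getD, hn]
  · simp [h]

-- every value list of the group dict is strictly increasing
lemma pv_groups_sorted (f : Int → Int) :
    ∀ (xs : List Int) (d : PySem.Dict Int (List Int)),
      xs.Pairwise (· < ·) →
      (∀ p ∈ d.items, p.2.Pairwise (· < ·) ∧ ∀ x ∈ p.2, ∀ y ∈ xs, x < y) →
      ∀ p ∈ (xs.foldl (fun d i => d.modify (f i) [] (fun t => t ++ [i])) d).items,
        p.2.Pairwise (· < ·) := by
  intro xs
  induction xs with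
  | nil => intro d _ hinv p hp; exact (hinv p hp).1
  | cons i rest ih =>
    intro d hpw hinv
    simp only [List.foldl_cons]
    apply ih _ (hpw.of_cons)
    intro p hp
    rw [PySem.Dict.modify] at hp
    rcases (PySem.Dict.mem_items_insert _ _ _ _).1 hp with h | ⟨hmem, _⟩
    · subst h
      simp only
      have hold : ∀ x ∈ d.getD (f i) [], (x < i ∧ ∀ y ∈ rest, x < y) := by
        intro x hx
        rw [PySem.Dict.getD] at hx
        cases hg : d.get? (f i) with
        | none => rw [hg] at hx; simp at hx
        | some w =>
          rw [hg] at hx; simp at hx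
          have := hinv (f i, w) (PySem.Dict.mem_items_of_get?_eq_some d hg)
          exact ⟨this.2 x hx i (by simp), fun y hy => this.2 x hx y (by simp [hy])⟩
      have hsorted : (d.getD (f i) []).Pairwise (· < ·) := by
        rw [PySem.Dict.getD]
        cases hg : d.get? (f i) with
        | none => simp
        | some w =>
          simpa using (hinv (f i, w) (PySem.Dict.mem_items_of_get?_eq_some d hg)).1
      constructor
      · rw [List.pairwise_append]
        exact ⟨hsorted, by simp, by intro x hx y hy; simp at hy; subst hy; exact (hold x hx).1⟩
      · intro x hx y hy
        rcases List.mem_append.1 hx with hx | hx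
        · exact (hold x hx).2 y hy
        · simp at hx; subst hx
          exact List.rel_of_pairwise_cons hpw hy
    · have := hinv p hmem
      exact ⟨this.1, fun x hx y hy => this.2 x hx y (by simp [hy])⟩

-- A's triple loop over one group, as a sum
lemma pv_tripleLoop (k : Int) (l : List Int) (c : Int) :
    (PySem.List.pyRange 0 (l.length : Int)).foldl (fun count i =>
        (PySem.List.pyRange (i + 1) (l.length : Int)).foldl (fun count j =>
          if PySem.List.pyGetD l j 0 - PySem.List.pyGetD l i 0 ≥ k then count + 1
          else count) count) c
      = c + pvA k l := by
  have inner : ∀ (c i : Int),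
      (PySem.List.pyRange (i + 1) (l.length : Int)).foldl (fun count j =>
        if PySem.List.pyGetD l j 0 - PySem.List.pyGetD l i 0 ≥ k then count + 1
        else count) c
      = c + ((PySem.List.pyRange (i + 1) (l.length : Int)).countP
              (fun j => decide (PySem.List.pyGetD l j 0 - PySem.List.pyGetD l i 0 ≥ k))) := by
    intro c i
    have := PySem.List.foldl_count_if
      (fun j => decide (PySem.List.pyGetD l j 0 - PySem.List.pyGetD l i 0 ≥ k))
      (PySem.List.pyRange (i + 1) (l.length : Int)) c
    simpa using this
  simp only [inner]
  rw [PySem.List.foldl_add]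
  congr 1
  rw [PySem.List.pyRange_zero_nat l.length, List.map_map]
  unfold pvA
  congr 1
  apply List.map_congr_left
  intro i hi
  have hiL : i < l.length := List.mem_range.mp hi
  simp only [Function.comp]
  rw [PySem.List.pyRange_one, List.countP_map]
  have h2 : (((l.length : Int)) - ((i : Int) + 1)).toNat = l.length - (i + 1) := by omega
  rw [h2]
  congr 1
  refine List.countP_congr ?_
  intro t ht
  simp only [Function.comp]
  unfold pvX
  have h1 : ((i : Int) + 1 + (t : Int)) = ((i + 1 + t : Nat) : Int) := by push_cast; ring
  simp only [h1, PySem.List.pyGetD_natCast]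

-- exchanging the order of summation over pairs
lemma pv_swap (X : Nat → Nat → Bool) (L : Nat) :
    ((List.range L).map (fun i =>
      ((List.range (L - (i + 1))).countP (fun t => X i (i + 1 + t)) : Int))).sum
    = ((List.range L).map (fun q => (((List.range q).countP (fun p => X p q) : Nat) : Int))).sum := by
  induction L with
  | zero => simp
  | succ L ih =>
    rw [List.range_succ, List.map_append, List.map_append, List.sum_append, List.sum_append]
    have hlast1 : ((List.map (fun i =>
        ((List.range (L + 1 - (i + 1))).countP (fun t => X i (i + 1 + t)) : Int)) [L]).sum) = 0 := by
      simp
    have hterm : ∀ i ∈ List.range L,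
        ((List.range (L + 1 - (i + 1))).countP (fun t => X i (i + 1 + t)) : Int)
        = ((List.range (L - (i + 1))).countP (fun t => X i (i + 1 + t)) : Int)
          + (if X i L then 1 else 0) := by
      intro i hi
      have hiL : i < L := List.mem_range.mp hi
      have h1 : L + 1 - (i + 1) = (L - (i + 1)) + 1 := by omega
      rw [h1, List.range_succ, List.countP_append]
      have h2 : i + 1 + (L - (i + 1)) = L := by omega
      simp [h2]
    rw [List.map_congr_left hterm]
    rw [List.sum_map_add]
    rw [PySem.List.sum_map_ite_one_zero]
    rw [hlast1, ih]
    simp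

lemma pv_A_eq_B (k : Int) (l : List Int) : pvA k l = pvB k l := by
  unfold pvA pvB pvN
  exact pv_swap (pvX k l) l.length

-- count of an initial segment
lemma pv_countP_lt (q lo : Nat) (h : lo ≤ q) :
    (List.range q).countP (fun p => decide (p < lo)) = lo := by
  have hmin : ∀ m : Nat, (List.range m).countP (fun p => decide (p < lo)) = min lo m := by
    intro m
    induction m with
    | zero => simp
    | succ m ih =>
      rw [List.range_succ, List.countP_append, ih]
      by_cases hm : m < lo <;> simp [hm] <;> omega
  rw [hmin]; omega

-- downward closure of validity on a sorted list
lemma pv_dc (k : Int) (l : List Int) (hs : l.Pairwise (· < ·)) (p' p q : Nat)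
    (h1 : p' ≤ p) (h2 : p < q) (h3 : q < l.length) (h : pvX k l p q = true) :
    pvX k l p' q = true := by
  simp only [pvX, decide_eq_true_eq] at *
  rcases Nat.lt_or_ge p' p with hlt | hge
  · have := (List.pairwise_iff_getElem.mp hs) p' p (by omega) (by omega) hlt
    rw [List.getD_eq_getElem l 0 (by omega), List.getD_eq_getElem l 0 (by omega)] at *
    omega
  · have : p' = p := by omega
    subst this; exact h

-- p below the count means p is valid
lemma pv_prefix (k : Int) (l : List Int) (hs : l.Pairwise (· < ·)) (p q : Nat)
    (h3 : q < l.length) (hp : p < pvN k l q) : p < q ∧ pvX k l p q = true := by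
  have hNq : pvN k l q ≤ q := by
    have := List.countP_le_length (l := List.range q) (p := fun p => pvX k l p q)
    simpa [pvN] using this
  have hpq : p < q := by omega
  refine ⟨hpq, ?_⟩
  by_contra hX
  have hmono : ∀ r ∈ List.range q, pvX k l r q = true → decide (r < p) = true := by
    intro r hr hXr
    have hrq : r < q := List.mem_range.mp hr
    simp only [decide_eq_true_eq]
    by_contra hge
    exact hX (pv_dc k l hs p r q (by omega) hrq h3 hXr)
  have := List.countP_mono_left hmono
  rw [pv_countP_lt q p (by omega)] at this
  simp only [pvN] at hp
  omega

-- the while loop lands exactly on the count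
lemma pv_advance_spec (k : Int) (l : List Int) (hs : l.Pairwise (· < ·)) (q lo : Nat)
    (hq : q < l.length) (hlo : lo ≤ q) (hv : ∀ p, p < lo → pvX k l p q = true) :
    pvAdvance k (PySem.List.pyGetD l (q : Int) 0) l (q : Int) (lo : Int) = (pvN k l q : Int) := by
  generalize hfuel : q - lo = fuel
  induction fuel generalizing lo with
  | zero =>
    have hlq : lo = q := by omega
    subst hlq
    rw [pvAdvance]
    rw [if_neg (by simp)]
    have : pvN k l lo = lo := by
      simp only [pvN]
      rw [List.countP_eq_length.mpr, List.length_range]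
      intro p hp
      exact hv p (List.mem_range.mp hp)
    rw [this]
  | succ fuel ih =>
    have hltq : lo < q := by omega
    by_cases hX : pvX k l lo q = true
    · rw [pvAdvance]
      rw [if_pos ?_]
      · have : ((lo : Int) + 1) = ((lo + 1 : Nat) : Int) := by push_cast; ring
        rw [this]
        apply ih (lo + 1) (by omega) ?_ (by omega)
        intro p hp
        rcases Nat.lt_or_ge p lo with h | h
        · exact hv p h
        · have : p = lo := by omega
          subst this; exact hX
      · constructor
        · exact_mod_cast hltq
        · simp only [pvX, decide_eq_true_eq] at hX
          simp only [PySem.List.pyGetD_natCast]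
          omega
    · rw [pvAdvance]
      rw [if_neg ?_]
      · have : pvN k l q = lo := by
          simp only [pvN]
          rw [List.countP_congr (q := fun p => decide (p < lo)) ?_]
          · exact pv_countP_lt q lo (by omega)
          · intro r hr
            have hrq : r < q := List.mem_range.mp hr
            simp only [decide_eq_true_eq]
            constructor
            · intro hXr
              by_contra hge
              exact hX (pv_dc k l hs lo r q (by omega) hrq hq hXr)
            · intro hrlo
              exact hv r hrlo
        rw [this]
      · rintro ⟨h1, h2⟩
        apply hX
        simp only [pvX, decide_eq_true_eq]
        simp only [PySem.List.pyGetD_natCast] at h2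
        omega

-- B's two-pointer loop over one group, as a sum
def pvPrev (k : Int) (l : List Int) : Nat → Nat
  | 0 => 0
  | m + 1 => pvN k l m

lemma pv_tp_inv (k : Int) (l : List Int) (hs : l.Pairwise (· < ·)) (c : Int) :
    ∀ m, m ≤ l.length →
      ((PySem.List.pyRange 0 (m : Int)).foldl (fun s q =>
          let lo := pvAdvance k (PySem.List.pyGetD l q 0) l q s.1
          (lo, s.2 + lo)) ((0 : Int), c))
      = ((pvPrev k l m : Int), c + ((List.range m).map (fun q => (pvN k l q : Int))).sum) := by
  intro m
  induction m with
  | zero => intro _; simp [PySem.List.pyRange, pvPrev]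
  | succ m ih =>
    intro hm
    have hcast : ((m + 1 : Nat) : Int) = (m : Int) + 1 := by push_cast; ring
    rw [hcast, PySem.List.pyRange_one_succ_right (by positivity), List.foldl_append,
        ih (by omega)]
    simp only [List.foldl_cons, List.foldl_nil]
    have hadv : pvAdvance k (PySem.List.pyGetD l (m : Int) 0) l (m : Int) ((pvPrev k l m : Nat) : Int)
        = (pvN k l m : Int) := by
      apply pv_advance_spec k l hs m (pvPrev k l m) (by omega) ?_ ?_
      · cases m with
        | zero => simp [pvPrev]
        | succ m' =>
          simp only [pvPrev]
          have := List.countP_le_length (l := List.range m') (p := fun p => pvX k l p m')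
          simp only [List.length_range] at this
          simp only [pvN]
          omega
      · intro p hp
        cases m with
        | zero => simp [pvPrev] at hp
        | succ m' =>
          simp only [pvPrev] at hp
          have h := pv_prefix k l hs p m' (by omega) hp
          simp only [pvX, decide_eq_true_eq] at h ⊢
          rw [List.getD_eq_getElem l 0 (show m' + 1 < l.length by omega),
              List.getD_eq_getElem l 0 (show p < l.length by omega)]
          rw [List.getD_eq_getElem l 0 (show m' < l.length by omega),
              List.getD_eq_getElem l 0 (show p < l.length by omega)] at h
          have hlt := (List.pairwise_iff_getElem.mp hs) m' (m' + 1) (by omega) (by omega) (by omega)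
          omega
    simp only [hadv]
    rw [List.range_succ, List.map_append, List.sum_append]
    simp [pvPrev]
    ring

lemma pv_twoPointer (k : Int) (l : List Int) (hs : l.Pairwise (· < ·)) (c : Int) :
    ((PySem.List.pyRange 0 (l.length : Int)).foldl (fun s q =>
        let lo := pvAdvance k (PySem.List.pyGetD l q 0) l q s.1
        (lo, s.2 + lo)) ((0 : Int), c)).2
      = c + pvB k l := by
  rw [pv_tp_inv k l hs c l.length (le_refl _)]
  rfl

-- ===== VERDICT (by name: the statement is the Claim_ definition above) =====
theorem count_ice_creams_spec : Claim_equal_count_ice_creams := by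
  intro n k a _hdom _hpre
  unfold Spec_count_ice_creams count_ice_creams count_ice_creams_alt
  by_cases hk : k = 0
  · simp [hk]
  · simp only [hk, if_false]
    have hdict :
        (PySem.List.pyRange 0 n).foldl (fun d i =>
          let v := PySem.List.pyGetD a i 0
          if d.contains v = false then d.insert v [i]
          else d.modify v [] (fun t => t ++ [i])) PySem.Dict.empty
        = (PySem.List.pyRange 0 n).foldl (fun d i =>
            d.modify (PySem.List.pyGetD a i 0) [] (fun t => t ++ [i])) PySem.Dict.empty := by
      apply PySem.List.foldl_congr_mem
      intro d i _
      exact pv_step_eq d (PySem.List.pyGetD a i 0) i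
    rw [hdict]
    set dictB := (PySem.List.pyRange 0 n).foldl (fun d i =>
        d.modify (PySem.List.pyGetD a i 0) [] (fun t => t ++ [i])) PySem.Dict.empty with hdB
    have hsorted : ∀ p ∈ dictB.items, p.2.Pairwise (· < ·) := by
      apply pv_groups_sorted (fun i => PySem.List.pyGetD a i 0) (PySem.List.pyRange 0 n)
        PySem.Dict.empty
      · exact PySem.List.pairwise_lt_pyRange_one 0 n
      · intro p hp
        simp [PySem.Dict.empty] at hp
    have hvals : dictB.values = dictB.items.map (fun p => p.2) := rfl
    rw [hvals, List.foldl_map]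
    have hfold :
        dictB.items.foldl (fun count fi =>
          let inds := fi.2
          (PySem.List.pyRange 0 (inds.length : Int)).foldl (fun count i =>
            (PySem.List.pyRange (i + 1) (inds.length : Int)).foldl (fun count j =>
              if PySem.List.pyGetD inds j 0 - PySem.List.pyGetD inds i 0 ≥ k then count + 1
              else count) count) count) 0
        = dictB.items.foldl (fun count fi =>
            ((PySem.List.pyRange 0 (fi.2.length : Int)).foldl (fun s q =>
              let lo := pvAdvance k (PySem.List.pyGetD fi.2 q 0) fi.2 q s.1
              (lo, s.2 + lo)) ((0 : Int), count)).2) 0 := by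
      apply PySem.List.foldl_congr_mem
      intro c fi hfi
      simp only
      rw [pv_tripleLoop k fi.2 c, pv_twoPointer k fi.2 (hsorted fi hfi) c, pv_A_eq_B]
    rw [hfold]
    split_ifs with hc
    · exact hc.1.symm
    · rfl
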